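-- pv_equiv track=rewrite | github.com/SLindberg-intera/new_docs | pylib/gen_soil_indices/gen_soil_indices.py | soil_index
-- ===== SOURCE A (Python) =====
-- class SoilGroups:
--     raw_soil_indices = {
--         'burbank loamy sand': 1,
--         'dunesand': 2,
--         'ephrata sandy loam': 3,
--         'esquatzel silt loam': 4,
--         'hezel sand': 5,
--         'kiona silt loam': 6,
--         'koehler sand': 7,
--         'pasco silt loam': 8,
--         'quincy sand': 9,
--         'riverwash': 10,
--         'scooteney stoney silt loam': 11,
--         'warden silt loam': 12
--     }
--     grouped_soil_indices = {
--         1: {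
--             'raw_indices': [9, 10],
--             'group_name': 'Rupert Sand'
--         },
--         2: {
--             'raw_indices': [5, 7],
--             'group_name': 'Hezel/Koehler Sand'
--         },
--         3: {
--             'raw_indices': [2],
--             'group_name': 'Dunesand'
--         },
--         4: {
--             'raw_indices': [1],
--             'group_name': 'Burbank Loamy Sand'
--         },
--         5: {
--             'raw_indices': [3],
--             'group_name': 'Ephrata Sandy Loam'
--         },
--         6: {
--             'raw_indices': [4, 6, 8, 11, 12],
--             'group_name': 'Esquatzel/Pasco/Kiona/Warden Silt Loam'
--         }
--     }
--
-- def soil_index(soil):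
--     """
--     This expects the full soil name and returns the corresponding soil index value.
--     :param soil:    A string representation of the soil name
--     :return:        An integer of the index associated with the soil name
--     """
--     try:
--         soil = soil.lower()
--     except:
--         soil = None
--     if soil in SoilGroups.raw_soil_indices:
--         raw_index = SoilGroups.raw_soil_indices[soil]
--     else:
--         return 0
--     # Obtain final/grouped index
--     for key in SoilGroups.grouped_soil_indices:
--         if raw_index in SoilGroups.grouped_soil_indices[key]['raw_indices']:
--             return key
-- ===== SOURCE B (Python) =====
-- # B: direct classifier — an if-chain over the grouped soil names, one test per group,
-- # no dicts or index tables at all.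
-- def soil_index(soil):
--     try:
--         s = soil.lower()
--     except Exception:
--         return 0
--     if s in ('quincy sand', 'riverwash'):
--         return 1
--     if s in ('hezel sand', 'koehler sand'):
--         return 2
--     if s == 'dunesand':
--         return 3
--     if s == 'burbank loamy sand':
--         return 4
--     if s == 'ephrata sandy loam':
--         return 5
--     if s in ('esquatzel silt loam', 'kiona silt loam', 'pasco silt loam',
--              'scooteney stoney silt loam', 'warden silt loam'):
--         return 6
--     return 0
-- ===== Notes on version B (the rewrite author's own statement) =====
-- stated objective: simpler
-- what changed: B drops both lookup tables and classifies the lowercased name directly with one membership test per group (a six-branch if-chain), instead of A's name-to-raw-index dict lookup followed by a scan over the group table.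
import Mathlib
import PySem

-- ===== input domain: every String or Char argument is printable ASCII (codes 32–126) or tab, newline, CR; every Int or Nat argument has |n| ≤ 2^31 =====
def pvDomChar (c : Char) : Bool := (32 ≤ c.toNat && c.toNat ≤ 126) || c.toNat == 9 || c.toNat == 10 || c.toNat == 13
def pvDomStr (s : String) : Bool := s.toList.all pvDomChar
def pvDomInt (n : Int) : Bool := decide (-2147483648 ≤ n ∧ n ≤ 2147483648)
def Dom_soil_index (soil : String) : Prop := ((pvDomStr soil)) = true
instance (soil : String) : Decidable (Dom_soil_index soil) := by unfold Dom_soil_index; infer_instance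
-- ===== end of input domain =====

-- B replaces A's dict-lookup-then-scan with a direct six-branch classifier on the lowercased name (simpler).

-- ===== PORT A =====
def pvRawSoilIndices : PySem.Dict String Int := PySem.Dict.mk
  [("burbank loamy sand", 1), ("dunesand", 2), ("ephrata sandy loam", 3),
   ("esquatzel silt loam", 4), ("hezel sand", 5), ("kiona silt loam", 6),
   ("koehler sand", 7), ("pasco silt loam", 8), ("quincy sand", 9),
   ("riverwash", 10), ("scooteney stoney silt loam", 11), ("warden silt loam", 12)]

-- grouped_soil_indices as (key, raw_indices) in insertion order (group_name is never read)
def pvGroupedSoilIndices : List (Int × List Int) :=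
  [(1, [9, 10]), (2, [5, 7]), (3, [2]), (4, [1]), (5, [3]), (6, [4, 6, 8, 11, 12])]

-- A's 'for key in grouped_soil_indices: if raw_index in …: return key'; falling off the end
-- (Python's implicit None) is unreachable for these literal tables, rendered as 0
def pvFindGroup (rawIndex : Int) : List (Int × List Int) → Int
  | [] => 0
  | (key, raws) :: rest => if rawIndex ∈ raws then key else pvFindGroup rawIndex rest

def soil_index (soil : String) : Int :=
  let s := PySem.Str.lower soil
  match pvRawSoilIndices.get? s with
  | some rawIndex => pvFindGroup rawIndex pvGroupedSoilIndices
  | none => 0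

-- ===== PORT B =====
def soil_index_alt (soil : String) : Int :=
  let s := PySem.Str.lower soil
  if s = "quincy sand" ∨ s = "riverwash" then 1
  else if s = "hezel sand" ∨ s = "koehler sand" then 2
  else if s = "dunesand" then 3
  else if s = "burbank loamy sand" then 4
  else if s = "ephrata sandy loam" then 5
  else if s = "esquatzel silt loam" ∨ s = "kiona silt loam" ∨ s = "pasco silt loam" ∨
          s = "scooteney stoney silt loam" ∨ s = "warden silt loam" then 6
  else 0

-- ===== PRECONDITION & SPEC =====
def Spec_soil_index (soil : String) (out : Int) : Prop := out = soil_index_alt soil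
instance (soil : String) (out : Int) : Decidable (Spec_soil_index soil out) := by unfold Spec_soil_index; infer_instance

-- ===== CLAIM (what is proved, stated in full; the proofs are below) =====
def Claim_equal_soil_index : Prop := ∀ (soil : String), Dom_soil_index soil → Spec_soil_index soil (soil_index soil)

-- ===== LEMMAS AND PROOFS =====
set_option maxHeartbeats 2000000 in
lemma pv_core (t : String) :
    (match pvRawSoilIndices.get? t with
     | some rawIndex => pvFindGroup rawIndex pvGroupedSoilIndices
     | none => 0)
    = (if t = "quincy sand" ∨ t = "riverwash" then 1
       else if t = "hezel sand" ∨ t = "koehler sand" then 2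
       else if t = "dunesand" then 3
       else if t = "burbank loamy sand" then 4
       else if t = "ephrata sandy loam" then 5
       else if t = "esquatzel silt loam" ∨ t = "kiona silt loam" ∨ t = "pasco silt loam" ∨
               t = "scooteney stoney silt loam" ∨ t = "warden silt loam" then 6
       else 0) := by
  by_cases h1 : t = "burbank loamy sand"
  · subst h1; decide
  by_cases h2 : t = "dunesand"
  · subst h2; decide
  by_cases h3 : t = "ephrata sandy loam"
  · subst h3; decide
  by_cases h4 : t = "esquatzel silt loam"
  · subst h4; decide
  by_cases h5 : t = "hezel sand"
  · subst h5; decide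
  by_cases h6 : t = "kiona silt loam"
  · subst h6; decide
  by_cases h7 : t = "koehler sand"
  · subst h7; decide
  by_cases h8 : t = "pasco silt loam"
  · subst h8; decide
  by_cases h9 : t = "quincy sand"
  · subst h9; decide
  by_cases h10 : t = "riverwash"
  · subst h10; decide
  by_cases h11 : t = "scooteney stoney silt loam"
  · subst h11; decide
  by_cases h12 : t = "warden silt loam"
  · subst h12; decide
  have g1 : ¬("burbank loamy sand" = t) := fun e => h1 e.symm
  have g2 : ¬("dunesand" = t) := fun e => h2 e.symm
  have g3 : ¬("ephrata sandy loam" = t) := fun e => h3 e.symm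
  have g4 : ¬("esquatzel silt loam" = t) := fun e => h4 e.symm
  have g5 : ¬("hezel sand" = t) := fun e => h5 e.symm
  have g6 : ¬("kiona silt loam" = t) := fun e => h6 e.symm
  have g7 : ¬("koehler sand" = t) := fun e => h7 e.symm
  have g8 : ¬("pasco silt loam" = t) := fun e => h8 e.symm
  have g9 : ¬("quincy sand" = t) := fun e => h9 e.symm
  have g10 : ¬("riverwash" = t) := fun e => h10 e.symm
  have g11 : ¬("scooteney stoney silt loam" = t) := fun e => h11 e.symm
  have g12 : ¬("warden silt loam" = t) := fun e => h12 e.symm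
  simp only [pvRawSoilIndices, PySem.Dict.get?_mk_cons, beq_iff_eq,
    g1, g2, g3, g4, g5, g6, g7, g8, g9, g10, g11, g12,
    h1, h2, h3, h4, h5, h6, h7, h8, h9, h10, h11, h12,
    if_false, or_self]
  rfl

-- ===== VERDICT (by name: the statement is the Claim_ definition above) =====
theorem soil_index_spec : Claim_equal_soil_index := by
  intro soil _
  unfold Spec_soil_index soil_index soil_index_alt
  exact pv_core (PySem.Str.lower soil)
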